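-- pv_equiv track=rewrite | github.com/KirillZhabin/Codewars | 7 kyu/Fizz  Buzz.py | solution
-- ===== SOURCE A (Python) =====
-- def solution(number):
--     a = 0
--     b = 0
--     c = 0
--     for n in range(3, number):
--         if n % 15 == 0:
--             c += 1
--         elif n % 5 == 0:
--             b += 1
--         elif n % 3 == 0:
--             a += 1
--     return [a, b, c]
-- ===== SOURCE B (Python) =====
-- def solution(number):
--     m = max(number - 1, 0)
--     f = m // 15
--     return [m // 3 - f, m // 5 - f, f]
-- ===== Notes on version B (the rewrite author's own statement) =====
-- stated objective: faster
-- what changed: Replaces the O(n) loop over range(3, number) with O(1) floor-division counting formulas (multiples of 3/5/15 below number, clamped for empty ranges).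
import Mathlib
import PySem

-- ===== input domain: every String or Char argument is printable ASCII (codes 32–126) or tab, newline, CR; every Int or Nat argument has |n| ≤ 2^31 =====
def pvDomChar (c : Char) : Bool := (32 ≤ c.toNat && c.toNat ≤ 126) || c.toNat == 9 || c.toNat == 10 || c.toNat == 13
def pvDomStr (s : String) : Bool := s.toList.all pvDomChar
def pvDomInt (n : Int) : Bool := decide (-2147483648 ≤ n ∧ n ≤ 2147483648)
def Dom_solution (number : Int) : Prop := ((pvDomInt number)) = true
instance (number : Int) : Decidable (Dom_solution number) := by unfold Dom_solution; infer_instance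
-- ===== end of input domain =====

-- B replaces the O(n) counting loop with closed-form floor-division counts (clamped for empty ranges).
-- ===== PORT A =====
def solution (number : Int) : List Int :=
  let s := (PySem.List.pyRange 3 number 1).foldl
    (fun (st : Int × Int × Int) n =>
      let (a, b, c) := st
      if PySem.Int.mod n 15 == 0 then (a, b, c + 1)
      else if PySem.Int.mod n 5 == 0 then (a, b + 1, c)
      else if PySem.Int.mod n 3 == 0 then (a + 1, b, c)
      else (a, b, c)) (0, 0, 0)
  [s.1, s.2.1, s.2.2]

-- ===== PORT B =====
def solution_alt (number : Int) : List Int :=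
  let m := max (number - 1) 0
  let f := PySem.Int.floordiv m 15
  [PySem.Int.floordiv m 3 - f, PySem.Int.floordiv m 5 - f, f]

-- ===== PRECONDITION & SPEC =====
def Spec_solution (number : Int) (out : List Int) : Prop := out = solution_alt number
instance (number : Int) (out : List Int) : Decidable (Spec_solution number out) := by unfold Spec_solution; infer_instance

-- ===== CLAIM (what is proved, stated in full; the proofs are below) =====
def Claim_equal_solution : Prop := ∀ (number : Int), Dom_solution number → Spec_solution number (solution number)

-- ===== LEMMAS AND PROOFS =====

theorem solution_loop_state (k : Nat) :
    (PySem.List.pyRange 3 (3 + (k : Int)) 1).foldl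
      (fun (st : Int × Int × Int) n =>
        let (a, b, c) := st
        if PySem.Int.mod n 15 == 0 then (a, b, c + 1)
        else if PySem.Int.mod n 5 == 0 then (a, b + 1, c)
        else if PySem.Int.mod n 3 == 0 then (a + 1, b, c)
        else (a, b, c)) (0, 0, 0)
    = (PySem.Int.floordiv (2 + (k : Int)) 3 - PySem.Int.floordiv (2 + (k : Int)) 15,
       PySem.Int.floordiv (2 + (k : Int)) 5 - PySem.Int.floordiv (2 + (k : Int)) 15,
       PySem.Int.floordiv (2 + (k : Int)) 15) := by
  induction k with
  | zero => decide
  | succ k ih =>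
    have h1 : (3 : Int) ≤ 3 + (k : Int) := by omega
    have hr : PySem.List.pyRange 3 (3 + ((k : Int) + 1)) 1
        = PySem.List.pyRange 3 (3 + (k : Int)) 1 ++ [3 + (k : Int)] := by
      simpa [add_assoc] using
        PySem.List.pyRange_one_succ_right (a := 3) (b := 3 + (k : Int)) h1
    push_cast
    rw [hr, List.foldl_append, ih, List.foldl_cons, List.foldl_nil]
    have e3 : ∀ a : Int, PySem.Int.floordiv a 3 = a / 3 := fun a =>
      PySem.Int.floordiv_eq_ediv_of_pos (by norm_num)
    have e5 : ∀ a : Int, PySem.Int.floordiv a 5 = a / 5 := fun a =>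
      PySem.Int.floordiv_eq_ediv_of_pos (by norm_num)
    have e15 : ∀ a : Int, PySem.Int.floordiv a 15 = a / 15 := fun a =>
      PySem.Int.floordiv_eq_ediv_of_pos (by norm_num)
    have m3 : ∀ a : Int, PySem.Int.mod a 3 = a % 3 := fun a =>
      PySem.Int.mod_eq_emod_of_pos (by norm_num)
    have m5 : ∀ a : Int, PySem.Int.mod a 5 = a % 5 := fun a =>
      PySem.Int.mod_eq_emod_of_pos (by norm_num)
    have m15 : ∀ a : Int, PySem.Int.mod a 15 = a % 15 := fun a =>
      PySem.Int.mod_eq_emod_of_pos (by norm_num)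
    simp only [e3, e5, e15, m3, m5, m15, beq_iff_eq]
    have h23 : (2 : Int) + ((k : Int) + 1) = 3 + (k : Int) := by ring
    rw [h23]
    split_ifs with h15 h5 h3 <;> simp only [Prod.mk.injEq]
    · -- n % 15 = 0: all three single-divisor quotients step by 1
      have c3 : (3 + (k : Int)) % 3 = 0 := by omega
      have c5 : (3 + (k : Int)) % 5 = 0 := by omega
      have d3 : (3 + (k : Int)) / 3 = (2 + (k : Int)) / 3 + 1 := by omega
      have d5 : (3 + (k : Int)) / 5 = (2 + (k : Int)) / 5 + 1 := by omega
      have d15 : (3 + (k : Int)) / 15 = (2 + (k : Int)) / 15 + 1 := by omega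
      refine ⟨by omega, by omega, by omega⟩
    · -- n % 5 = 0, n % 15 ≠ 0: hence n % 3 ≠ 0
      have c3 : ¬ (3 + (k : Int)) % 3 = 0 := fun h => h15 (by omega)
      have d3 : (3 + (k : Int)) / 3 = (2 + (k : Int)) / 3 := by omega
      have d5 : (3 + (k : Int)) / 5 = (2 + (k : Int)) / 5 + 1 := by omega
      have d15 : (3 + (k : Int)) / 15 = (2 + (k : Int)) / 15 := by omega
      refine ⟨by omega, by omega, by omega⟩
    · -- n % 3 = 0, n % 5 ≠ 0 (hence n % 15 ≠ 0)
      have d3 : (3 + (k : Int)) / 3 = (2 + (k : Int)) / 3 + 1 := by omega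
      have d5 : (3 + (k : Int)) / 5 = (2 + (k : Int)) / 5 := by omega
      have d15 : (3 + (k : Int)) / 15 = (2 + (k : Int)) / 15 := by omega
      refine ⟨by omega, by omega, by omega⟩
    · -- no divisor: all quotients unchanged
      have d3 : (3 + (k : Int)) / 3 = (2 + (k : Int)) / 3 := by omega
      have d5 : (3 + (k : Int)) / 5 = (2 + (k : Int)) / 5 := by omega
      have d15 : (3 + (k : Int)) / 15 = (2 + (k : Int)) / 15 := by omega
      refine ⟨by omega, by omega, by omega⟩

theorem solution_le3 (number : Int) (h : number ≤ 3) : solution number = solution_alt number := by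
  have hnil : PySem.List.pyRange 3 number 1 = [] := PySem.List.pyRange_one_eq_nil h
  have e : ∀ (a b : Int), 0 < b → PySem.Int.floordiv a b = a / b := fun a b hb =>
    PySem.Int.floordiv_eq_ediv_of_pos hb
  simp only [solution, hnil, List.foldl_nil, solution_alt,
    e _ 3 (by norm_num), e _ 5 (by norm_num), e _ 15 (by norm_num), List.cons.injEq, and_true]
  refine ⟨?_, ?_, ?_⟩ <;> omega

-- ===== VERDICT (by name: the statement is the Claim_ definition above) =====
theorem solution_spec : Claim_equal_solution := by
  intro number _
  unfold Spec_solution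
  rcases le_or_gt number 3 with h | h
  · exact solution_le3 number h
  · obtain ⟨k, hk⟩ : ∃ k : Nat, number = 3 + (k : Int) := ⟨(number - 3).toNat, by omega⟩
    subst hk
    simp only [solution, solution_alt, solution_loop_state k]
    have hm : max (3 + (k : Int) - 1) 0 = 2 + (k : Int) := by omega
    rw [hm]
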